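-- pv_equiv track=rewrite | github.com/Safary16/soptraloc | soptraloc_system/apps/containers/services/status_utils.py | related_status_values
-- ===== SOURCE A (Python) =====
-- from typing import Dict, Iterable, List
--
-- DEFAULT_STATUS = "PROGRAMADO"
--
-- CANONICAL_STATUSES: Dict[str, str] = {
--     "PROGRAMADO": "PROGRAMADO",
--     "EN_PROCESO": "EN_PROCESO",
--     "EN_TRANSITO": "EN_TRANSITO",
--     "LIBERADO": "LIBERADO",
--     "DESCARGADO": "DESCARGADO",
--     "EN_SECUENCIA": "EN_SECUENCIA",
--     "ASIGNADO": "ASIGNADO",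
--     "EN_RUTA": "EN_RUTA",
--     "ARRIBADO": "ARRIBADO",
--     "FINALIZADO": "FINALIZADO",
--     "POR_ARRIBAR": "POR_ARRIBAR",
--     "SECUENCIADO": "SECUENCIADO",
--     "TRG": "TRG",
-- }
--
-- STATUS_ALIASES: Dict[str, str] = {
--     "": DEFAULT_STATUS,
--     "AVAILABLE": "PROGRAMADO",
--     "DISPONIBLE": "PROGRAMADO",
--     "PROGRAMMED": "PROGRAMADO",
--     "LOADING": "EN_PROCESO",
--     "EN PROCESO": "EN_PROCESO",
--     "IN_TRANSIT": "EN_TRANSITO",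
--     "IN TRANSIT": "EN_TRANSITO",
--     "EN_TRANSITO": "EN_TRANSITO",
--     "EN TRANSITO": "EN_TRANSITO",
--     "DISPATCHED": "LIBERADO",
--     "RELEASED": "LIBERADO",
--     "FINISHED": "FINALIZADO",
--     "POR ARRIBAR": "POR_ARRIBAR",
--     "EN SECUENCIA": "EN_SECUENCIA",
--     "TRG": "TRG",
--     "FINALIZADO": "FINALIZADO",
--     "LIBERADO": "LIBERADO",
--     "DESCARGADO": "DESCARGADO",
--     "ASIGNADO": "ASIGNADO",
--     "EN_RUTA": "EN_RUTA",
--     "ARRIBADO": "ARRIBADO",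
--     "SECUENCIADO": "SECUENCIADO",
-- }
--
-- def related_status_values(status_code: str) -> List[str]:
--     """Return all raw values that should map to the given status code."""
--     canonical = normalize_status(status_code)
--     related = {canonical}
--     for alias, target in STATUS_ALIASES.items():
--         if normalize_status(target) == canonical or target == canonical:
--             if alias:
--                 related.add(alias)
--     return sorted(related)
--
-- def normalize_status(raw_status: str | None) -> str:
--     """Return a canonical status for the given value."""
--     if raw_status is None:
--         return DEFAULT_STATUS
--
--     value = str(raw_status).strip()
--     if not value:
--         return DEFAULT_STATUS
--
--     upper_value = value.upper()
--     if upper_value in CANONICAL_STATUSES: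
--         return upper_value
--     if upper_value in STATUS_ALIASES:
--         return STATUS_ALIASES[upper_value]
--
--     # Default fallback keeps system consistent and avoids invalid values
--     return DEFAULT_STATUS
-- ===== SOURCE B (Python) =====
-- from typing import Dict, List
--
-- DEFAULT_STATUS = "PROGRAMADO"
--
-- # Flat lookup table: any recognised (stripped, upper-cased) value -> its canonical status.
-- _CANONICAL_OF: Dict[str, str] = {
--     "": "PROGRAMADO",
--     "AVAILABLE": "PROGRAMADO",
--     "DISPONIBLE": "PROGRAMADO",
--     "PROGRAMMED": "PROGRAMADO",
--     "PROGRAMADO": "PROGRAMADO",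
--     "LOADING": "EN_PROCESO",
--     "EN PROCESO": "EN_PROCESO",
--     "EN_PROCESO": "EN_PROCESO",
--     "IN_TRANSIT": "EN_TRANSITO",
--     "IN TRANSIT": "EN_TRANSITO",
--     "EN_TRANSITO": "EN_TRANSITO",
--     "EN TRANSITO": "EN_TRANSITO",
--     "DISPATCHED": "LIBERADO",
--     "RELEASED": "LIBERADO",
--     "LIBERADO": "LIBERADO",
--     "FINISHED": "FINALIZADO",
--     "FINALIZADO": "FINALIZADO",
--     "POR ARRIBAR": "POR_ARRIBAR",
--     "POR_ARRIBAR": "POR_ARRIBAR",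
--     "EN SECUENCIA": "EN_SECUENCIA",
--     "EN_SECUENCIA": "EN_SECUENCIA",
--     "TRG": "TRG",
--     "DESCARGADO": "DESCARGADO",
--     "ASIGNADO": "ASIGNADO",
--     "EN_RUTA": "EN_RUTA",
--     "ARRIBADO": "ARRIBADO",
--     "SECUENCIADO": "SECUENCIADO",
-- }
--
-- # Precomputed reverse index: canonical status -> sorted list of the canonical
-- # itself plus every non-empty alias mapping to it.
-- _RELATED: Dict[str, List[str]] = {
--     "PROGRAMADO": ["AVAILABLE", "DISPONIBLE", "PROGRAMADO", "PROGRAMMED"],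
--     "EN_PROCESO": ["EN PROCESO", "EN_PROCESO", "LOADING"],
--     "EN_TRANSITO": ["EN TRANSITO", "EN_TRANSITO", "IN TRANSIT", "IN_TRANSIT"],
--     "LIBERADO": ["DISPATCHED", "LIBERADO", "RELEASED"],
--     "DESCARGADO": ["DESCARGADO"],
--     "EN_SECUENCIA": ["EN SECUENCIA", "EN_SECUENCIA"],
--     "ASIGNADO": ["ASIGNADO"],
--     "EN_RUTA": ["EN_RUTA"],
--     "ARRIBADO": ["ARRIBADO"],
--     "FINALIZADO": ["FINALIZADO", "FINISHED"],
--     "POR_ARRIBAR": ["POR ARRIBAR", "POR_ARRIBAR"],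
--     "SECUENCIADO": ["SECUENCIADO"],
--     "TRG": ["TRG"],
-- }
--
-- def related_status_values(status_code: str) -> List[str]:
--     """Return all raw values that should map to the given status code."""
--     canonical = _CANONICAL_OF.get(status_code.strip().upper(), DEFAULT_STATUS)
--     return list(_RELATED[canonical])
-- ===== Notes on version B (the rewrite author's own statement) =====
-- stated objective: simpler
-- what changed: B replaces A's per-call scan over STATUS_ALIASES (calling normalize_status on every entry and accumulating a set that is then sorted) by two precomputed tables: a flat stripped/upper-cased-value->canonical dict that replaces normalize_status's branch chain, and a reverse index canonical->sorted related list, so each call is strip/upper plus two dict lookups.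
import Mathlib
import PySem

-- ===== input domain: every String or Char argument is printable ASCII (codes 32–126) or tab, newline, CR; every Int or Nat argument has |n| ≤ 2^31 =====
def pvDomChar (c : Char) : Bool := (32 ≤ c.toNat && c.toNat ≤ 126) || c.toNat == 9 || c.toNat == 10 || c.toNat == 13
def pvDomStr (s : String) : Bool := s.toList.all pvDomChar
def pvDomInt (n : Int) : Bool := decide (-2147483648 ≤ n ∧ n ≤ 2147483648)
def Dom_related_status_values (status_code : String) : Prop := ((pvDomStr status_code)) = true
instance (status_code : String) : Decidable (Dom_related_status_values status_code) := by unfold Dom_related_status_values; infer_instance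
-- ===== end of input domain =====

-- B replaces A's per-call scan over STATUS_ALIASES (with a normalize call per entry)
-- by two precomputed literal tables: a flat value->canonical lookup and a reverse
-- index canonical->sorted related values; each call is strip/upper plus two lookups (simpler).

-- ===== PORT A =====
def DEFAULT_STATUS : String := "PROGRAMADO"

def CANONICAL_STATUSES : PySem.Dict String String := PySem.Dict.ofList [
  ("PROGRAMADO", "PROGRAMADO"), ("EN_PROCESO", "EN_PROCESO"), ("EN_TRANSITO", "EN_TRANSITO"),
  ("LIBERADO", "LIBERADO"), ("DESCARGADO", "DESCARGADO"), ("EN_SECUENCIA", "EN_SECUENCIA"),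
  ("ASIGNADO", "ASIGNADO"), ("EN_RUTA", "EN_RUTA"), ("ARRIBADO", "ARRIBADO"),
  ("FINALIZADO", "FINALIZADO"), ("POR_ARRIBAR", "POR_ARRIBAR"), ("SECUENCIADO", "SECUENCIADO"),
  ("TRG", "TRG")]

def STATUS_ALIASES : PySem.Dict String String := PySem.Dict.ofList [
  ("", DEFAULT_STATUS), ("AVAILABLE", "PROGRAMADO"), ("DISPONIBLE", "PROGRAMADO"),
  ("PROGRAMMED", "PROGRAMADO"), ("LOADING", "EN_PROCESO"), ("EN PROCESO", "EN_PROCESO"),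
  ("IN_TRANSIT", "EN_TRANSITO"), ("IN TRANSIT", "EN_TRANSITO"), ("EN_TRANSITO", "EN_TRANSITO"),
  ("EN TRANSITO", "EN_TRANSITO"), ("DISPATCHED", "LIBERADO"), ("RELEASED", "LIBERADO"),
  ("FINISHED", "FINALIZADO"), ("POR ARRIBAR", "POR_ARRIBAR"), ("EN SECUENCIA", "EN_SECUENCIA"),
  ("TRG", "TRG"), ("FINALIZADO", "FINALIZADO"), ("LIBERADO", "LIBERADO"),
  ("DESCARGADO", "DESCARGADO"), ("ASIGNADO", "ASIGNADO"), ("EN_RUTA", "EN_RUTA"),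
  ("ARRIBADO", "ARRIBADO"), ("SECUENCIADO", "SECUENCIADO")]

def normalize_status (raw_status : Option String) : String :=
  match raw_status with
  | none => DEFAULT_STATUS
  | some raw =>
    let value := PySem.Str.strip raw
    if value = "" then DEFAULT_STATUS
    else
      let upper_value := PySem.Str.upper value
      if CANONICAL_STATUSES.contains upper_value then upper_value
      else if STATUS_ALIASES.contains upper_value then
        -- dict indexing, guarded by the contains check just above: never defaults
        (STATUS_ALIASES.get? upper_value).getD DEFAULT_STATUS
      else DEFAULT_STATUS

def related_status_values (status_code : String) : List String :=
  let canonical := normalize_status (some status_code)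
  let related : PySem.Set String := PySem.Set.ofList [canonical]
  let related := STATUS_ALIASES.items.foldl (fun r p =>
      if normalize_status (some p.2) = canonical ∨ p.2 = canonical then
        if p.1 ≠ "" then PySem.Set.add r p.1 else r
      else r) related
  -- sorted(related): Python's string order = code-point lexicographic = order on List Char
  -- (Lean's own String `<` is kernel-opaque, so the sort key is the character list)
  PySem.List.sorted related (fun x => x.toList) false

-- ===== PORT B =====
-- flat lookup table: recognised (stripped, upper-cased) value -> canonical status
def CANONICAL_OF : PySem.Dict String String := PySem.Dict.ofList [
  ("", "PROGRAMADO"), ("AVAILABLE", "PROGRAMADO"), ("DISPONIBLE", "PROGRAMADO"),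
  ("PROGRAMMED", "PROGRAMADO"), ("PROGRAMADO", "PROGRAMADO"),
  ("LOADING", "EN_PROCESO"), ("EN PROCESO", "EN_PROCESO"), ("EN_PROCESO", "EN_PROCESO"),
  ("IN_TRANSIT", "EN_TRANSITO"), ("IN TRANSIT", "EN_TRANSITO"),
  ("EN_TRANSITO", "EN_TRANSITO"), ("EN TRANSITO", "EN_TRANSITO"),
  ("DISPATCHED", "LIBERADO"), ("RELEASED", "LIBERADO"), ("LIBERADO", "LIBERADO"),
  ("FINISHED", "FINALIZADO"), ("FINALIZADO", "FINALIZADO"),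
  ("POR ARRIBAR", "POR_ARRIBAR"), ("POR_ARRIBAR", "POR_ARRIBAR"),
  ("EN SECUENCIA", "EN_SECUENCIA"), ("EN_SECUENCIA", "EN_SECUENCIA"),
  ("TRG", "TRG"), ("DESCARGADO", "DESCARGADO"), ("ASIGNADO", "ASIGNADO"),
  ("EN_RUTA", "EN_RUTA"), ("ARRIBADO", "ARRIBADO"), ("SECUENCIADO", "SECUENCIADO")]

-- precomputed reverse index: canonical -> sorted({canonical} ∪ its non-empty aliases)
def RELATED : PySem.Dict String (List String) := PySem.Dict.ofList [
  ("PROGRAMADO", ["AVAILABLE", "DISPONIBLE", "PROGRAMADO", "PROGRAMMED"]),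
  ("EN_PROCESO", ["EN PROCESO", "EN_PROCESO", "LOADING"]),
  ("EN_TRANSITO", ["EN TRANSITO", "EN_TRANSITO", "IN TRANSIT", "IN_TRANSIT"]),
  ("LIBERADO", ["DISPATCHED", "LIBERADO", "RELEASED"]),
  ("DESCARGADO", ["DESCARGADO"]),
  ("EN_SECUENCIA", ["EN SECUENCIA", "EN_SECUENCIA"]),
  ("ASIGNADO", ["ASIGNADO"]),
  ("EN_RUTA", ["EN_RUTA"]),
  ("ARRIBADO", ["ARRIBADO"]),
  ("FINALIZADO", ["FINALIZADO", "FINISHED"]),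
  ("POR_ARRIBAR", ["POR ARRIBAR", "POR_ARRIBAR"]),
  ("SECUENCIADO", ["SECUENCIADO"]),
  ("TRG", ["TRG"])]

def related_status_values_alt (status_code : String) : List String :=
  let canonical := CANONICAL_OF.getD (PySem.Str.upper (PySem.Str.strip status_code)) DEFAULT_STATUS
  -- dict indexing _RELATED[canonical]: the key is always a canonical status, so it is
  -- always present and the .getD [] default is never taken
  (RELATED.get? canonical).getD []

-- ===== PRECONDITION & SPEC =====
def Spec_related_status_values (status_code : String) (out : List String) : Prop := out = related_status_values_alt status_code
instance (status_code : String) (out : List String) : Decidable (Spec_related_status_values status_code out) := by unfold Spec_related_status_values; infer_instance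

-- ===== CLAIM (what is proved, stated in full; the proofs are below) =====
def Claim_equal_related_status_values : Prop := ∀ (status_code : String), Dom_related_status_values status_code → Spec_related_status_values status_code (related_status_values status_code)

-- ===== LEMMAS AND PROOFS =====

-- A's branching normalize equals B's single flat-table lookup
theorem normA_eq_flat (s : String) :
    normalize_status (some s)
      = CANONICAL_OF.getD (PySem.Str.upper (PySem.Str.strip s)) DEFAULT_STATUS := by
  show (let value := PySem.Str.strip s;
    if value = "" then DEFAULT_STATUS
    else
      let u := PySem.Str.upper value
      if CANONICAL_STATUSES.contains u then u
      else if STATUS_ALIASES.contains u then (STATUS_ALIASES.get? u).getD DEFAULT_STATUS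
      else DEFAULT_STATUS)
      = CANONICAL_OF.getD (PySem.Str.upper (PySem.Str.strip s)) DEFAULT_STATUS
  by_cases hv : PySem.Str.strip s = ""
  · simp only [hv]; decide
  · simp only [hv, if_false]
    generalize PySem.Str.upper (PySem.Str.strip s) = u
    by_cases hm : u ∈ CANONICAL_OF.keys
    · fin_cases hm <;> decide
    · have hall1 : ∀ x ∈ CANONICAL_STATUSES.keys, x ∈ CANONICAL_OF.keys := by decide
      have hall2 : ∀ x ∈ STATUS_ALIASES.keys, x ∈ CANONICAL_OF.keys := by decide
      have h1 : CANONICAL_STATUSES.contains u = false := by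
        cases h : CANONICAL_STATUSES.contains u
        · rfl
        · exact absurd (hall1 u ((PySem.Dict.contains_iff_mem_keys _ _).mp h)) hm
      have h2 : STATUS_ALIASES.contains u = false := by
        cases h : STATUS_ALIASES.contains u
        · rfl
        · exact absurd (hall2 u ((PySem.Dict.contains_iff_mem_keys _ _).mp h)) hm
      have h3 : CANONICAL_OF.contains u = false := by
        cases h : CANONICAL_OF.contains u
        · rfl
        · exact absurd ((PySem.Dict.contains_iff_mem_keys _ _).mp h) hm
      rw [PySem.Dict.getD_of_not_contains _ _ h3]
      simp [h1, h2]

-- B's flat lookup always lands on a canonical status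
theorem flat_mem (s : String) :
    CANONICAL_OF.getD (PySem.Str.upper (PySem.Str.strip s)) DEFAULT_STATUS
      ∈ CANONICAL_STATUSES.keys := by
  generalize PySem.Str.upper (PySem.Str.strip s) = u
  rcases ho : CANONICAL_OF.get? u with _ | v
  · rw [PySem.Dict.getD_of_get?_eq_none _ _ ho]; decide
  · rw [PySem.Dict.getD_of_get?_eq_some _ _ ho]
    have hv : v ∈ CANONICAL_OF.values := by
      have hm := PySem.Dict.mem_items_of_get?_eq_some CANONICAL_OF ho
      simp only [PySem.Dict.values]
      exact List.mem_map.mpr ⟨_, hm, rfl⟩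
    have hall : ∀ x ∈ CANONICAL_OF.values, x ∈ CANONICAL_STATUSES.keys := by decide
    exact hall v hv

-- A's scan-and-sort and B's precomputed reverse index agree on every canonical status
theorem scan_eq_table (c : String) (hc : c ∈ CANONICAL_STATUSES.keys) :
    PySem.List.sorted
      (STATUS_ALIASES.items.foldl (fun r p =>
        if normalize_status (some p.2) = c ∨ p.2 = c then
          if p.1 ≠ "" then PySem.Set.add r p.1 else r
        else r) (PySem.Set.ofList [c])) (fun x => x.toList) false
      = (RELATED.get? c).getD [] := by
  fin_cases hc <;> decide

-- ===== VERDICT (by name: the statement is the Claim_ definition above) =====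
theorem related_status_values_spec : Claim_equal_related_status_values := by
  intro s _
  unfold Spec_related_status_values related_status_values related_status_values_alt
  rw [normA_eq_flat]
  exact scan_eq_table _ (flat_mem s)
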